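-- pv_equiv track=rewrite | github.com/AndanteKim/LeetCode_Practice | 2355-maximum-number-of-books-you-can-take/2355-maximum-number-of-books-you-can-take.py | maximumBooks
-- ===== SOURCE A (Python) =====
-- from typing import List
--
-- def maximumBooks(books: List[int]) -> int:
--     n = len(books)
--
--     # calculate the sum of books in a given range [l, r]
--     def calculate_sum(l: int, r: int) -> int:
--         cnt = min(books[r], r - l + 1)
--         return (2 * books[r] - (cnt - 1)) * cnt // 2
--
--     stack = []
--     dp = [0] * n
--
--     for i in range(n):
--         # While we cannot push i, we pop from the stack
--         while stack and books[stack[-1]] - stack[-1] >= books[i] - i: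
--             stack.pop()
--
--         # compute dp[i]
--         if not stack:
--             dp[i] = calculate_sum(0, i)
--         else:
--             j = stack[-1]
--             dp[i] = dp[j] + calculate_sum(j + 1, i)
--
--         # push the current index onto the stack
--         stack.append(i)
--
--     # return the maximum element in the dp array
--     return max(dp)
-- ===== SOURCE B (Python) =====
-- from typing import List
--
-- def maximumBooks(books: List[int]) -> int:
--     n = len(books)
--
--     # calculate the sum of books in a given range [l, r]
--     def calculate_sum(l: int, r: int) -> int:
--         cnt = min(books[r], r - l + 1)
--         return (2 * books[r] - (cnt - 1)) * cnt // 2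
--
--     dp = []
--     for i in range(n):
--         # scan backward for the nearest j with books[j]-j strictly smaller
--         j = i - 1
--         while j >= 0 and books[j] - j >= books[i] - i:
--             j -= 1
--         if j < 0:
--             dp.append(calculate_sum(0, i))
--         else:
--             dp.append(dp[j] + calculate_sum(j + 1, i))
--     return max(dp)
-- ===== Notes on version B (the rewrite author's own statement) =====
-- stated objective: simpler
-- what changed: Replaces the monotonic stack and preallocated dp array with a plain backward scan per index for the nearest position with strictly smaller books[k]-k, appending dp values as it goes.
import Mathlib
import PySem

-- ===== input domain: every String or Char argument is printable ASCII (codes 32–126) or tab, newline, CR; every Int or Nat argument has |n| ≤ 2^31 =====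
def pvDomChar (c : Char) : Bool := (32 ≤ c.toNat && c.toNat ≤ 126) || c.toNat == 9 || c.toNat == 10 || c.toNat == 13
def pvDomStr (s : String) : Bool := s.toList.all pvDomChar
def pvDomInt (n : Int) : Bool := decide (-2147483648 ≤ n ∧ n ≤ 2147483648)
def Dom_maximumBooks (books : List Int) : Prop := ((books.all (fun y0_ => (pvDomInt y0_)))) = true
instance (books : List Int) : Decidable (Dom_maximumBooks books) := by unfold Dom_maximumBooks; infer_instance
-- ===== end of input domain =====

-- B replaces A's monotonic stack with a simpler per-index backward scan; equal return values proved.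

-- ===== PORT A =====
-- calculate_sum(l, r) of the Python (shared verbatim by A and B)
def pvCalcSum (books : List Int) (l r : Nat) : Int :=
  let cnt : Int := min (books.getD r 0) ((r : Int) - (l : Int) + 1)
  PySem.Int.floordiv ((2 * books.getD r 0 - (cnt - 1)) * cnt) 2

-- the `while stack and books[stack[-1]] - stack[-1] >= books[i] - i: stack.pop()` loop (head = top of stack)
def pvPop (books : List Int) (i : Nat) : List Nat → List Nat
  | [] => []
  | t :: s =>
    if books.getD t 0 - (t : Int) ≥ books.getD i 0 - (i : Int) then pvPop books i s
    else t :: s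

-- one iteration of A's for-loop: state = (stack, dp array)
def pvStepA (books : List Int) (st : List Nat × List Int) (i : Nat) : List Nat × List Int :=
  let stack := pvPop books i st.1
  let v := match stack with
    | [] => pvCalcSum books 0 i
    | j :: _ => st.2.getD j 0 + pvCalcSum books (j + 1) i
  (i :: stack, st.2.set i v)

def maximumBooks (books : List Int) : Int :=
  let n := books.length
  let st := (List.range n).foldl (pvStepA books) ([], List.replicate n 0)
  (PySem.List.max? st.2 (fun x => x)).getD 0

-- ===== PORT B =====
-- Source B's inner while loop: scan j = fuel-1, fuel-2, … down, first index with key strictly below ki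
def pvFindPrev (books : List Int) (ki : Int) : Nat → Option Nat
  | 0 => none
  | j + 1 =>
    if books.getD j 0 - (j : Int) < ki then some j
    else pvFindPrev books ki j

-- one iteration of Source B's for-loop; dp grows by append
def pvStepB (books : List Int) (dp : List Int) (i : Nat) : List Int :=
  dp ++ [match pvFindPrev books (books.getD i 0 - (i : Int)) i with
    | none => pvCalcSum books 0 i
    | some j => dp.getD j 0 + pvCalcSum books (j + 1) i]

def maximumBooks_alt (books : List Int) : Int :=
  let n := books.length
  let dp := (List.range n).foldl (pvStepB books) []
  (PySem.List.max? dp (fun x => x)).getD 0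

-- ===== PRECONDITION & SPEC =====
-- Pre_ excludes only the empty list, on which Python's max(dp) raises ValueError (in A and in B alike).
def Pre_maximumBooks (books : List Int) : Prop := books ≠ []
instance (books : List Int) : Decidable (Pre_maximumBooks books) := by unfold Pre_maximumBooks; infer_instance
def pvWitness_maximumBooks : List Int := ([1, 2, 3] : List Int)

def Spec_maximumBooks (books : List Int) (out : Int) : Prop := out = maximumBooks_alt books
instance (books : List Int) (out : Int) : Decidable (Spec_maximumBooks books out) := by unfold Spec_maximumBooks; infer_instance

-- ===== CLAIM (what is proved, stated in full; the proofs are below) =====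
def Claim_equal_maximumBooks : Prop := ∀ (books : List Int), Dom_maximumBooks books → Pre_maximumBooks books → Spec_maximumBooks books (maximumBooks books)

-- ===== LEMMAS AND PROOFS =====

-- key i = books[i] - i, the quantity both programs compare
def pvKey (books : List Int) (k : Nat) : Int := books.getD k 0 - (k : Int)

theorem pvFindPrev_lt (books : List Int) (ki : Int) :
    ∀ f j, pvFindPrev books ki f = some j → j < f := by
  intro f
  induction f with
  | zero => intro j h; simp [pvFindPrev] at h
  | succ g ih =>
    intro j h
    simp only [pvFindPrev] at h
    split at h
    · cases h; omega
    · exact Nat.lt_trans (ih j h) (Nat.lt_succ_self g)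

-- the recursive dp both programs compute
def pvDP (books : List Int) : Nat → Int
  | i =>
    match h : pvFindPrev books (pvKey books i) i with
    | none => pvCalcSum books 0 i
    | some j => pvDP books j + pvCalcSum books (j + 1) i
termination_by i => i
decreasing_by exact pvFindPrev_lt books _ i j h

theorem pvDP_eq (books : List Int) (i : Nat) :
    pvDP books i = match pvFindPrev books (pvKey books i) i with
      | none => pvCalcSum books 0 i
      | some j => pvDP books j + pvCalcSum books (j + 1) i := by
  rw [pvDP]
  cases hfp : pvFindPrev books (pvKey books i) i <;> simp [hfp]

-- the chain of successive nearest-smaller indices (= A's stack contents, head = top)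
def pvChain (books : List Int) : Option Nat → List Nat
  | none => []
  | some k => k :: pvChain books (pvFindPrev books (pvKey books k) k)
termination_by o => match o with | none => 0 | some k => k + 1
decreasing_by
  have := pvFindPrev_lt books (pvKey books k) k
  cases hh : pvFindPrev books (pvKey books k) k with
  | none => simp
  | some j => simp; have := this j hh; omega

theorem pvChain_none (books : List Int) : pvChain books none = [] := by rw [pvChain]

theorem pvChain_some (books : List Int) (k : Nat) :
    pvChain books (some k) = k :: pvChain books (pvFindPrev books (pvKey books k) k) := by
  rw [pvChain]

theorem pvFindPrev_some_spec (books : List Int) (ki : Int) :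
    ∀ f j, pvFindPrev books ki f = some j →
      pvKey books j < ki ∧ ∀ m, j < m → m < f → ¬ pvKey books m < ki := by
  intro f
  induction f with
  | zero => intro j h; simp [pvFindPrev] at h
  | succ g ih =>
    intro j h
    simp only [pvFindPrev] at h
    split at h
    · cases h
      refine ⟨by simpa [pvKey] using ‹_›, ?_⟩
      intro m hm1 hm2; omega
    · rename_i hge
      obtain ⟨h1, h2⟩ := ih j h
      refine ⟨h1, ?_⟩
      intro m hm1 hm2
      by_cases hme : m = g
      · subst hme; simpa [pvKey] using hge
      · exact h2 m hm1 (by omega)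

theorem pvFindPrev_none_spec (books : List Int) (ki : Int) :
    ∀ f, pvFindPrev books ki f = none → ∀ m, m < f → ¬ pvKey books m < ki := by
  intro f
  induction f with
  | zero => intro _ m hm; omega
  | succ g ih =>
    intro h m hm
    simp only [pvFindPrev] at h
    split at h
    · cases h
    · rename_i hge
      by_cases hme : m = g
      · subst hme; simpa [pvKey] using hge
      · exact ih h m (by omega)

-- scanning past a stretch of keys ≥ ki changes nothing
theorem pvFindPrev_congr (books : List Int) (ki : Int) :
    ∀ f f', f' ≤ f → (∀ m, f' ≤ m → m < f → ¬ pvKey books m < ki) →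
      pvFindPrev books ki f = pvFindPrev books ki f' := by
  intro f
  induction f with
  | zero =>
    intro f' h _
    have : f' = 0 := by omega
    rw [this]
  | succ g ih =>
    intro f' hle hm
    by_cases he : f' = g + 1
    · subst he; rfl
    · have hle' : f' ≤ g := by omega
      have hg : ¬ pvKey books g < ki := hm g hle' (Nat.lt_succ_self g)
      simp only [pvFindPrev]
      rw [if_neg (by simpa [pvKey] using hg)]
      exact ih f' hle' (fun m h1 h2 => hm m h1 (by omega))

-- popping A's stack (= a chain) yields the chain of B's backward-scan result
theorem pvPop_chain (books : List Int) (i : Nat) :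
    ∀ k, k < i →
      pvPop books i (pvChain books (some k)) =
        pvChain books (pvFindPrev books (pvKey books i) (k + 1)) := by
  intro k
  induction k using Nat.strong_induction_on with
  | _ k ih =>
    intro hki
    rw [pvChain_some]
    by_cases hlt : pvKey books k < pvKey books i
    · have hcond : ¬ books.getD k 0 - (k : Int) ≥ books.getD i 0 - (i : Int) := by
        simp only [pvKey, not_lt, ge_iff_le] at hlt ⊢; omega
      rw [pvPop, if_neg hcond]
      have hfp : pvFindPrev books (pvKey books i) (k + 1) = some k := by
        simp only [pvFindPrev]
        rw [if_pos (by simpa [pvKey] using hlt)]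
      rw [hfp, pvChain_some]
    · have hge : books.getD k 0 - (k : Int) ≥ books.getD i 0 - (i : Int) := by
        simp only [pvKey, not_lt, ge_iff_le] at hlt ⊢; omega
      rw [pvPop, if_pos hge]
      have hstep : pvFindPrev books (pvKey books i) (k + 1) = pvFindPrev books (pvKey books i) k := by
        simp only [pvFindPrev]
        rw [if_neg (by simp only [pvKey, not_lt, ge_iff_le] at hlt ⊢; omega)]
      cases hfp : pvFindPrev books (pvKey books k) k with
      | none =>
        rw [pvChain_none]
        have hall := pvFindPrev_none_spec books (pvKey books k) k hfp
        have hnone : pvFindPrev books (pvKey books i) k = none := by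
          rw [pvFindPrev_congr books _ k 0 (Nat.zero_le k)
            (fun m _ hm => by have := hall m hm; simp only [pvKey, not_lt, ge_iff_le] at this hlt ⊢; omega)]
          rfl
        rw [hstep, hnone, pvChain_none]
        rfl
      | some k' =>
        have hk' : k' < k := pvFindPrev_lt books _ k k' hfp
        have hspec := pvFindPrev_some_spec books (pvKey books k) k k' hfp
        have hskip : pvFindPrev books (pvKey books i) k = pvFindPrev books (pvKey books i) (k' + 1) := by
          apply pvFindPrev_congr books _ k (k' + 1) (by omega)
          intro m h1 h2
          have := hspec.2 m (by omega) h2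
          simp only [pvKey, not_lt, ge_iff_le] at this hlt ⊢; omega
        rw [hstep, hskip, ← ih k' hk' (by omega)]

def pvStk (books : List Int) (k : Nat) : List Nat :=
  match k with
  | 0 => []
  | j + 1 => pvChain books (some j)

-- A's loop invariant: stack is the chain, dp holds pvDP on processed indices
theorem pvFoldA_inv (books : List Int) :
    ∀ k, k ≤ books.length →
      ((List.range k).foldl (pvStepA books) ([], List.replicate books.length 0)).1 = pvStk books k ∧
      ((List.range k).foldl (pvStepA books) ([], List.replicate books.length 0)).2.length = books.length ∧
      (∀ m, m < k → ((List.range k).foldl (pvStepA books) ([], List.replicate books.length 0)).2.getD m 0 = pvDP books m) := by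
  intro k
  induction k with
  | zero =>
    intro _
    refine ⟨rfl, by simp, ?_⟩; intro m hm; omega
  | succ k ih =>
    intro hk
    obtain ⟨hstk, hlen, hdp⟩ := ih (by omega)
    rw [List.range_succ, List.foldl_append, List.foldl_cons, List.foldl_nil]
    set s := (List.range k).foldl (pvStepA books) ([], List.replicate books.length 0) with hs
    have hkn : k < books.length := by omega
    -- stack after popping = chain of pvFindPrev (key k) k
    have hpop : pvPop books k s.1 = pvChain books (pvFindPrev books (pvKey books k) k) := by
      rw [hstk]
      cases k with
      | zero => simp [pvStk, pvPop, pvFindPrev, pvChain_none]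
      | succ j =>
        show pvPop books (j + 1) (pvChain books (some j)) = _
        rw [pvPop_chain books (j + 1) j (by omega)]
    -- the computed value is pvDP k
    have hval : (match pvPop books k s.1 with
        | [] => pvCalcSum books 0 k
        | j :: _ => s.2.getD j 0 + pvCalcSum books (j + 1) k) = pvDP books k := by
      rw [hpop, pvDP_eq]
      cases hfp : pvFindPrev books (pvKey books k) k with
      | none => rw [pvChain_none]
      | some j =>
        rw [pvChain_some]
        have hj : j < k := pvFindPrev_lt books _ k j hfp
        simp only
        rw [hdp j hj]
    refine ⟨?_, ?_, ?_⟩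
    · show k :: pvPop books k s.1 = pvStk books (k + 1)
      rw [hpop, pvStk, pvChain_some]
    · show (s.2.set k _).length = books.length
      simp [hlen]
    · intro m hm
      show (s.2.set k _).getD m 0 = pvDP books m
      by_cases hmk : m = k
      · subst hmk
        rw [List.getD_eq_getElem?_getD, List.getElem?_set_self (by omega)]
        simpa using hval
      · rw [List.getD_eq_getElem?_getD, List.getElem?_set_ne (by omega), ← List.getD_eq_getElem?_getD]
        exact hdp m (by omega)

-- B's loop invariant: dp list = map pvDP (range k)
theorem pvFoldB_inv (books : List Int) :
    ∀ k, (List.range k).foldl (pvStepB books) [] = (List.range k).map (pvDP books) := by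
  intro k
  induction k with
  | zero => rfl
  | succ k ih =>
    rw [List.range_succ, List.foldl_append, List.foldl_cons, List.foldl_nil, List.map_append, ih]
    unfold pvStepB
    congr 1
    simp only [List.map]
    rw [pvDP_eq books k]
    have hkk : books.getD k 0 - (k : Int) = pvKey books k := rfl
    rw [hkk]
    cases hfp : pvFindPrev books (pvKey books k) k with
    | none => simp
    | some j =>
      have hj : j < k := pvFindPrev_lt books _ k j hfp
      simp only [hfp]
      rw [List.getD_eq_getElem?_getD, List.getElem?_map, List.getElem?_range hj]
      rfl

-- the two dp arrays coincide
theorem pvDPlists_eq (books : List Int) :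
    ((List.range books.length).foldl (pvStepA books) ([], List.replicate books.length 0)).2 =
      (List.range books.length).foldl (pvStepB books) [] := by
  obtain ⟨_, hlen, hdp⟩ := pvFoldA_inv books books.length (le_refl _)
  rw [pvFoldB_inv]
  apply List.ext_getElem
  · simp [hlen]
  · intro m h1 h2
    have hm : m < books.length := by simpa [hlen] using h1
    have hh := hdp m hm
    rw [List.getD_eq_getElem?_getD, List.getElem?_eq_getElem h1] at hh
    simp only [Option.getD_some] at hh
    rw [hh]
    simp [List.getElem_map, List.getElem_range]

-- ===== VERDICT (by name: the statement is the Claim_ definition above) =====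
theorem maximumBooks_spec : Claim_equal_maximumBooks := by
  intro books _ _
  unfold Spec_maximumBooks maximumBooks maximumBooks_alt
  simp only
  rw [pvDPlists_eq]
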